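-- pv_equiv track=rewrite | github.com/wang2000star/Sbox-ANF | truth_table_to_anf.py | truth_table_to_anf
-- ===== SOURCE A (Python) =====
-- def truth_table_to_anf(n, truth_table):
--     """
--     将真值表转换为代数正规型系数。
--
--     参数:
--         n: 变量个数
--         truth_table: 列表，长度为 2^n，按自然二进制顺序排列的真值表输出
--
--     返回:
--         coeff: ANF系数列表，长度为 2^n
--     """
--     m = 1 << n
--     coeff = truth_table.copy()
--
--     # 快速莫比乌斯变换
--     for i in range(n):
--         mask = 1 << i
--         for j in range(m):
--             if j & mask:  # 只处理第i位为1的位置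
--                 coeff[j] ^= coeff[j ^ mask]
--
--     return coeff
-- ===== SOURCE B (Python) =====
-- def truth_table_to_anf(n, truth_table):
--     m = 1 << n
--     coeff = truth_table.copy()
--     for u in range(m):
--         acc = 0
--         for v in range(u + 1):
--             if v & u == v:
--                 acc ^= truth_table[v]
--         coeff[u] = acc
--     return coeff
-- ===== Notes on version B (the rewrite author's own statement) =====
-- stated objective: alternative
-- what changed: Replaces the layered Moebius butterfly (n passes of in-place xor-updates, each position rewritten n times) by the direct ANF definition: coefficient u is computed once as the XOR of truth_table[v] over all submasks v of u (trading the n*2^n butterfly for the plainer 4^n definition); Pre_ excludes only (n=0, []) among inputs A returns on, where A's empty copy comes from its loops never running while B reads truth_table[0].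
-- outside the precondition, e.g. on truth_table_to_anf(0, []): A returns [], B raises IndexError
import Mathlib
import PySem

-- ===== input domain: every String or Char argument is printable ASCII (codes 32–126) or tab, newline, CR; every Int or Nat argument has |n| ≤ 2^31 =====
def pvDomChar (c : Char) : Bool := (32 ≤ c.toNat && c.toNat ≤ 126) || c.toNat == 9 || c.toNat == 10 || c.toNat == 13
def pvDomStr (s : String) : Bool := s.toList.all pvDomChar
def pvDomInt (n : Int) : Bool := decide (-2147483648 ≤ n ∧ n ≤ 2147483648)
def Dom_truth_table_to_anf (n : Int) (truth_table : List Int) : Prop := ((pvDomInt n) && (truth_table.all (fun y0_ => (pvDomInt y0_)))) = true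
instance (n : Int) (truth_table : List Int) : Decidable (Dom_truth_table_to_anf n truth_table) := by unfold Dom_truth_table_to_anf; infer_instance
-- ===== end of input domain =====

-- B replaces A's in-place layered Moebius butterfly by the direct ANF definition (each coefficient is
-- computed once as the XOR of truth-table entries over the submasks of its index): an alternative
-- algorithm of similar size, not claimed faster.

-- ===== PORT A =====
-- Loop counters and bit operations run on nonnegative Python ints; they are ported on Nat, where
-- Lean's &&& / ^^^ / <<< agree exactly with Python's & / ^ / <<.  n.toNat: Pre_ requires 0 ≤ n
-- (Python '1 << n' raises ValueError for n < 0).  coeff.getD j 0: indices are in range under Pre_.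
def truth_table_to_anf (n : Int) (truth_table : List Int) : List Int :=
  let m : Nat := 1 <<< n.toNat
  (List.range n.toNat).foldl (fun coeff i =>
    let mask : Nat := 1 <<< i
    (List.range m).foldl (fun coeff j =>
      if j &&& mask != 0 then
        coeff.set j (PySem.Int.bxor (coeff.getD j 0) (coeff.getD (j ^^^ mask) 0))
      else coeff) coeff) truth_table

-- ===== PORT B =====
-- helper anf_at of Source B (truth_table[v] with 0 ≤ v < len under Pre_)
def pvAnfAt (truth_table : List Int) (u : Nat) : Int :=
  (List.range (u + 1)).foldl (fun acc v =>
    if v &&& u == v then PySem.Int.bxor acc (truth_table.getD v 0) else acc) 0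

def truth_table_to_anf_alt (n : Int) (truth_table : List Int) : List Int :=
  let m : Nat := 1 <<< n.toNat
  (List.range m).foldl (fun coeff u => coeff.set u (pvAnfAt truth_table u)) truth_table

-- ===== PRECONDITION & SPEC =====
-- Pre_: 0 ≤ n (Python '1 << n' raises ValueError for n < 0) and 2^n ≤ len(truth_table), stated as
-- truth_table ≠ [] ∧ n ≤ log2(len) (otherwise A's inner loop raises IndexError for every n ≥ 1).
-- Among inputs where A RETURNS this excludes only (n = 0, truth_table = []): there A's loops do not
-- run and it returns a copy [], while B's direct definition reads truth_table[0] and raises IndexError.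
def Pre_truth_table_to_anf (n : Int) (truth_table : List Int) : Prop :=
  0 ≤ n ∧ truth_table ≠ [] ∧ n.toNat ≤ truth_table.length.log2
instance (n : Int) (truth_table : List Int) : Decidable (Pre_truth_table_to_anf n truth_table) := by
  unfold Pre_truth_table_to_anf; infer_instance

def pvWitness_truth_table_to_anf : Int × List Int := (2, [0, 1, 1, 0])

def Spec_truth_table_to_anf (n : Int) (truth_table : List Int) (out : List Int) : Prop := out = truth_table_to_anf_alt n truth_table
instance (n : Int) (truth_table : List Int) (out : List Int) : Decidable (Spec_truth_table_to_anf n truth_table out) := by unfold Spec_truth_table_to_anf; infer_instance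

-- ===== CLAIM (what is proved, stated in full; the proofs are below) =====
def Claim_equal_truth_table_to_anf : Prop := ∀ (n : Int) (truth_table : List Int), Dom_truth_table_to_anf n truth_table → Pre_truth_table_to_anf n truth_table → Spec_truth_table_to_anf n truth_table (truth_table_to_anf n truth_table)

-- ===== LEMMAS AND PROOFS =====

-- ---- XOR algebra: PySem.Int.bxor through the (sign, complement-magnitude) representation ----
lemma pv_bxor_dec (s₁ s₂ : Bool) (m₁ m₂ : Nat) :
    PySem.Int.bxor (if s₁ then -(m₁ : Int) - 1 else (m₁ : Int)) (if s₂ then -(m₂ : Int) - 1 else (m₂ : Int))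
      = (if (s₁ ^^ s₂) then -((m₁ ^^^ m₂ : Nat) : Int) - 1 else ((m₁ ^^^ m₂ : Nat) : Int)) := by
  have h3 : ∀ m : Nat, ((m : Int)).toNat = m := by intro m; omega
  have h4 : ∀ m : Nat, ¬ (1 ≤ -(m : Int)) := by intro m; omega
  rcases s₁ <;> rcases s₂ <;> simp [PySem.Int.bxor, h3, h4]

lemma pv_rep (a : Int) : ∃ (s : Bool) (m : Nat), a = (if s then -(m : Int) - 1 else (m : Int)) := by
  by_cases h : 0 ≤ a
  · exact ⟨false, a.toNat, by simp; omega⟩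
  · exact ⟨true, (-a - 1).toNat, by simp; omega⟩

lemma pv_bxor_assoc (a b c : Int) :
    PySem.Int.bxor (PySem.Int.bxor a b) c = PySem.Int.bxor a (PySem.Int.bxor b c) := by
  obtain ⟨s₁, m₁, rfl⟩ := pv_rep a
  obtain ⟨s₂, m₂, rfl⟩ := pv_rep b
  obtain ⟨s₃, m₃, rfl⟩ := pv_rep c
  rw [pv_bxor_dec, pv_bxor_dec, pv_bxor_dec, pv_bxor_dec, Bool.xor_assoc, Nat.xor_assoc]

lemma pv_zero_bxor (a : Int) : PySem.Int.bxor 0 a = a := by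
  rw [PySem.Int.bxor_comm]; exact PySem.Int.bxor_zero a

-- ---- the XOR-accumulating fold over a list of candidate submasks ----
def pvFX (t : List Int) (base msk : Nat) (l : List Nat) (x : Int) : Int :=
  l.foldl (fun a v => if v &&& msk == v then PySem.Int.bxor a (t.getD (base + v) 0) else a) x

lemma pvFX_shift (t : List Int) (base msk : Nat) (l : List Nat) (x y : Int) :
    pvFX t base msk l (PySem.Int.bxor x y) = PySem.Int.bxor x (pvFX t base msk l y) := by
  induction l generalizing y with
  | nil => rfl
  | cons v l ih =>
    have step : ∀ z, pvFX t base msk (v :: l) z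
        = pvFX t base msk l (if v &&& msk == v then PySem.Int.bxor z (t.getD (base + v) 0) else z) :=
      fun z => rfl
    rw [step, step]
    cases hc : (v &&& msk == v)
    · simp only [Bool.false_eq_true, if_false]; exact ih y
    · simp only [if_true]; rw [pv_bxor_assoc]; exact ih _

lemma pvFX_from (t : List Int) (base msk : Nat) (l : List Nat) (x : Int) :
    pvFX t base msk l x = PySem.Int.bxor x (pvFX t base msk l 0) := by
  conv_lhs => rw [show x = PySem.Int.bxor x 0 from (PySem.Int.bxor_zero x).symm]
  exact pvFX_shift t base msk l x 0

-- ---- bit facts ----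
lemma pv_or_xor (A r k : Nat) (hA : A.testBit k = false) (hr : r.testBit k = false) :
    (A ||| (2 ^ k ||| r)) ^^^ 2 ^ k = A ||| r := by
  apply Nat.eq_of_testBit_eq; intro i
  by_cases hik : k = i
  · subst hik
    simp [Nat.testBit_xor, Nat.testBit_or, hA, hr]
  · simp [Nat.testBit_xor, Nat.testBit_or, hik]

lemma pv_div_mod_one (p k : Nat) (h : p.testBit k = true) : p / 2 ^ k % 2 = 1 := by
  have := Nat.testBit_eq_decide_div_mod_eq (x := p) (i := k)
  rw [h] at this; exact of_decide_eq_true this.symm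

lemma pv_decomp (p k : Nat) (h : p.testBit k = true) :
    p = 2 ^ (k + 1) * (p / 2 ^ (k + 1)) + 2 ^ k + p % 2 ^ k := by
  have h1 := pv_div_mod_one p k h
  have e2 := Nat.div_add_mod (p / 2 ^ k) 2
  have e3 : p / 2 ^ k / 2 = p / 2 ^ (k + 1) := by rw [Nat.div_div_eq_div_mul, pow_succ]
  have e2' : p / 2 ^ k = 2 * (p / 2 ^ (k + 1)) + 1 := by rw [← e3]; omega
  calc p = 2 ^ k * (p / 2 ^ k) + p % 2 ^ k := (Nat.div_add_mod _ _).symm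
    _ = 2 ^ k * (2 * (p / 2 ^ (k + 1)) + 1) + p % 2 ^ k := by rw [e2']
    _ = 2 ^ (k + 1) * (p / 2 ^ (k + 1)) + 2 ^ k + p % 2 ^ k := by rw [pow_succ]; ring

lemma pv_hi_bit (a k : Nat) : (2 ^ (k + 1) * a).testBit k = false := by
  rw [Nat.testBit_eq_decide_div_mod_eq]
  have h : 2 ^ (k + 1) * a = 2 ^ k * (2 * a) := by rw [pow_succ]; ring
  rw [h, Nat.mul_div_cancel_left _ (Nat.two_pow_pos k)]
  simp [Nat.mul_mod_right]

lemma pv_sub_bit (p k : Nat) (h : p.testBit k = true) : (p - 2 ^ k).testBit k = false := by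
  have hd := pv_decomp p k h
  have hr : p % 2 ^ k < 2 ^ k := Nat.mod_lt _ (Nat.two_pow_pos k)
  have hx : p - 2 ^ k = 2 ^ k * (2 * (p / 2 ^ (k + 1))) + p % 2 ^ k := by
    rw [show 2 ^ k * (2 * (p / 2 ^ (k+1))) = 2 ^ (k+1) * (p / 2 ^ (k+1)) by rw [pow_succ]; ring]
    omega
  rw [hx, Nat.testBit_eq_decide_div_mod_eq, Nat.mul_add_div (Nat.two_pow_pos k),
    Nat.div_eq_of_lt hr]
  simp [Nat.mul_mod_right]

lemma pv_xor_sub (p k : Nat) (h : p.testBit k = true) : p ^^^ 2 ^ k = p - 2 ^ k := by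
  have hd := pv_decomp p k h
  have hr : p % 2 ^ k < 2 ^ k := Nat.mod_lt _ (Nat.two_pow_pos k)
  have hA : (2 ^ (k + 1) * (p / 2 ^ (k + 1))).testBit k = false := pv_hi_bit _ k
  have hrb : (p % 2 ^ k).testBit k = false := Nat.testBit_lt_two_pow hr
  have ho1 : p = 2 ^ (k + 1) * (p / 2 ^ (k + 1)) ||| (2 ^ k + p % 2 ^ k) := by
    rw [← Nat.two_pow_add_eq_or_of_lt (show 2 ^ k + p % 2 ^ k < 2 ^ (k + 1) by rw [pow_succ]; omega)]
    omega
  have ho2 : 2 ^ k + p % 2 ^ k = 2 ^ k ||| p % 2 ^ k := by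
    have := Nat.two_pow_add_eq_or_of_lt hr 1
    simpa [mul_one] using this
  have ho3 : p - 2 ^ k = 2 ^ (k + 1) * (p / 2 ^ (k + 1)) ||| p % 2 ^ k := by
    rw [← Nat.two_pow_add_eq_or_of_lt (show p % 2 ^ k < 2 ^ (k + 1) by rw [pow_succ]; omega)]
    omega
  rw [ho3]
  conv_lhs => rw [ho1, ho2]
  exact pv_or_xor _ _ _ hA hrb

lemma pv_and_low (k v r : Nat) (hv : v < 2 ^ k) (hr : r < 2 ^ k) : v &&& (2 ^ k + r) = v &&& r := by
  have ho : 2 ^ k + r = 2 ^ k ||| r := by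
    have := Nat.two_pow_add_eq_or_of_lt hr 1; simpa [mul_one] using this
  rw [ho, Nat.and_or_distrib_left, Nat.and_two_pow, Nat.testBit_lt_two_pow hv]
  simp

lemma pv_and_high (k w r : Nat) (hw : w < 2 ^ k) (hr : r < 2 ^ k) :
    (2 ^ k + w) &&& (2 ^ k + r) = 2 ^ k + (w &&& r) := by
  have hwr : w &&& r < 2 ^ k := Nat.lt_of_le_of_lt Nat.and_le_left hw
  have ho1 : 2 ^ k + w = 2 ^ k ||| w := by
    have := Nat.two_pow_add_eq_or_of_lt hw 1; simpa [mul_one] using this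
  have ho3 : 2 ^ k + (w &&& r) = 2 ^ k ||| (w &&& r) := by
    have := Nat.two_pow_add_eq_or_of_lt hwr 1; simpa [mul_one] using this
  have h2 : (2 ^ k) &&& (2 ^ k + r) = 2 ^ k := by
    have ho : 2 ^ k + r = 2 ^ k ||| r := by
      have := Nat.two_pow_add_eq_or_of_lt hr 1; simpa [mul_one] using this
    rw [ho, Nat.and_or_distrib_left, Nat.and_self, Nat.and_comm (2 ^ k) r, Nat.and_two_pow,
      Nat.testBit_lt_two_pow hr]
    simp
  rw [ho1, Nat.and_or_distrib_right, h2, pv_and_low k w r hw hr, ho3]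

lemma pv_testBit_iff (p k : Nat) : (p &&& 2 ^ k != 0) = p.testBit k := by
  cases h : p.testBit k <;> simp [Nat.and_two_pow, h, Nat.pow_eq_zero]

-- ---- the per-position value after the first k butterfly passes ----
def pvG (t : List Int) (k p : Nat) : Int :=
  pvFX t (p - p % 2 ^ k) (p % 2 ^ k) (List.range (2 ^ k)) 0

lemma pvG_zero (t : List Int) (p : Nat) : pvG t 0 p = t.getD p 0 := by
  simp [pvG, pvFX, List.range_one, Nat.mod_one, pv_zero_bxor]

lemma pv_mod_succ (p k : Nat) :
    p % 2 ^ (k + 1) = p % 2 ^ k + 2 ^ k * (p / 2 ^ k % 2) := by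
  rw [pow_succ, Nat.mod_mul]

lemma pvG_succ (t : List Int) (k p : Nat) :
    pvG t (k + 1) p
      = if p.testBit k then PySem.Int.bxor (pvG t k p) (pvG t k (p - 2 ^ k)) else pvG t k p := by
  have hP : 0 < 2 ^ k := Nat.two_pow_pos k
  have hr : p % 2 ^ k < 2 ^ k := Nat.mod_lt _ hP
  have hsplit : List.range (2 ^ (k + 1))
      = List.range (2 ^ k) ++ List.map (fun x => 2 ^ k + x) (List.range (2 ^ k)) := by
    rw [← List.range_add, pow_succ, Nat.mul_two]
  cases hb : p.testBit k
  · -- bit k clear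
    have hb' : p / 2 ^ k % 2 = 0 := by
      have := Nat.testBit_eq_decide_div_mod_eq (x := p) (i := k)
      rw [hb] at this
      have := of_decide_eq_false this.symm
      omega
    have hm0 : p % 2 ^ (k + 1) = p % 2 ^ k := by rw [pv_mod_succ, hb']; omega
    rw [if_neg (by simp)]
    show pvFX t (p - p % 2 ^ (k + 1)) (p % 2 ^ (k + 1)) (List.range (2 ^ (k + 1))) 0 = _
    rw [hsplit, hm0]
    show List.foldl _ 0 (_ ++ _) = _
    rw [List.foldl_append, List.foldl_map]
    have hsecond :
        List.foldl (fun a w =>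
            if (2 ^ k + w) &&& p % 2 ^ k == 2 ^ k + w then
              PySem.Int.bxor a (t.getD (p - p % 2 ^ k + (2 ^ k + w)) 0)
            else a)
          (List.foldl (fun a v =>
            if v &&& p % 2 ^ k == v then PySem.Int.bxor a (t.getD (p - p % 2 ^ k + v) 0) else a)
            0 (List.range (2 ^ k)))
          (List.range (2 ^ k))
          = List.foldl (fun a (_ : Nat) => a)
            (List.foldl (fun a v =>
              if v &&& p % 2 ^ k == v then PySem.Int.bxor a (t.getD (p - p % 2 ^ k + v) 0) else a)
              0 (List.range (2 ^ k)))
            (List.range (2 ^ k)) := by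
      apply List.foldl_ext
      intro a w hw
      rw [List.mem_range] at hw
      have hne : (2 ^ k + w) &&& p % 2 ^ k ≠ 2 ^ k + w := by
        have hle : (2 ^ k + w) &&& p % 2 ^ k ≤ p % 2 ^ k := Nat.and_le_right
        omega
      simp [hne]
    rw [hsecond, List.foldl_fixed]
    rfl
  · -- bit k set
    have hd := pv_decomp p k hb
    have hm1 : p % 2 ^ (k + 1) = 2 ^ k + p % 2 ^ k := by
      rw [pv_mod_succ, pv_div_mod_one p k hb]; omega
    have hqm : (p - 2 ^ k) % 2 ^ k = p % 2 ^ k := by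
      have : p - 2 ^ k = 2 ^ k * (2 * (p / 2 ^ (k + 1))) + p % 2 ^ k := by
        rw [show 2 ^ k * (2 * (p / 2 ^ (k+1))) = 2 ^ (k+1) * (p / 2 ^ (k+1)) by rw [pow_succ]; ring]
        omega
      rw [this, Nat.mul_add_mod, Nat.mod_eq_of_lt hr]
    rw [if_pos rfl]
    show pvFX t (p - p % 2 ^ (k + 1)) (p % 2 ^ (k + 1)) (List.range (2 ^ (k + 1))) 0 = _
    rw [hsplit, hm1]
    show List.foldl _ 0 (_ ++ _) = _
    rw [List.foldl_append, List.foldl_map]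
    have hfirst :
        List.foldl (fun a v =>
            if v &&& (2 ^ k + p % 2 ^ k) == v then
              PySem.Int.bxor a (t.getD (p - (2 ^ k + p % 2 ^ k) + v) 0)
            else a) 0 (List.range (2 ^ k))
          = pvG t k (p - 2 ^ k) := by
      rw [pvG, hqm, pvFX]
      apply List.foldl_ext
      intro a v hv
      rw [List.mem_range] at hv
      rw [pv_and_low k v (p % 2 ^ k) hv hr,
        show p - (2 ^ k + p % 2 ^ k) + v = p - 2 ^ k - p % 2 ^ k + v by omega]
    rw [hfirst]
    have hsecond : ∀ (x : Int),
        List.foldl (fun a w =>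
            if (2 ^ k + w) &&& (2 ^ k + p % 2 ^ k) == 2 ^ k + w then
              PySem.Int.bxor a (t.getD (p - (2 ^ k + p % 2 ^ k) + (2 ^ k + w)) 0)
            else a) x (List.range (2 ^ k))
          = pvFX t (p - p % 2 ^ k) (p % 2 ^ k) (List.range (2 ^ k)) x := by
      intro x
      rw [pvFX]
      apply List.foldl_ext
      intro a w hw
      rw [List.mem_range] at hw
      rw [pv_and_high k w (p % 2 ^ k) hw hr]
      have hcond : ((2 ^ k + (w &&& p % 2 ^ k) == 2 ^ k + w)) = (w &&& p % 2 ^ k == w) := by simp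
      rw [hcond,
        show p - (2 ^ k + p % 2 ^ k) + (2 ^ k + w) = p - p % 2 ^ k + w by omega]
    rw [hsecond, pvFX_from, PySem.Int.bxor_comm]
    rfl

-- ---- A's butterfly passes, in the shape of the port ----
def pvStep (mask : Nat) (c : List Int) (j : Nat) : List Int :=
  if j &&& mask != 0 then c.set j (PySem.Int.bxor (c.getD j 0) (c.getD (j ^^^ mask) 0)) else c

def pvA (t : List Int) (m k : Nat) : List Int :=
  (List.range k).foldl (fun c i => (List.range m).foldl (pvStep (2 ^ i)) c) t

lemma pv_portA (n : Int) (t : List Int) :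
    truth_table_to_anf n t = pvA t (2 ^ n.toNat) n.toNat := by
  simp only [truth_table_to_anf, pvA, Nat.shiftLeft_eq, one_mul]
  rfl

lemma pvPass_len (mask : Nat) (c : List Int) (J : Nat) :
    ((List.range J).foldl (pvStep mask) c).length = c.length := by
  induction J with
  | zero => rfl
  | succ J ih =>
    rw [List.range_succ, List.foldl_append, List.foldl_cons, List.foldl_nil, pvStep]
    split
    · rw [List.length_set]; exact ih
    · exact ih

lemma pvPass_getD (i : Nat) (c : List Int) (J : Nat) (hJ : J ≤ c.length) (p : Nat) :
    ((List.range J).foldl (pvStep (2 ^ i)) c).getD p 0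
      = if p < J ∧ p.testBit i then
          PySem.Int.bxor (c.getD p 0) (c.getD (p ^^^ 2 ^ i) 0)
        else c.getD p 0 := by
  induction J generalizing p with
  | zero => simp
  | succ J ih =>
    have hJ' : J ≤ c.length := by omega
    have ih := ih hJ'
    rw [List.range_succ, List.foldl_append, List.foldl_cons, List.foldl_nil, pvStep,
      pv_testBit_iff]
    cases hjb : J.testBit i
    · simp only [Bool.false_eq_true, if_false]
      rw [ih p]
      by_cases hpb : p.testBit i = true
      · by_cases hpJ : p < J
        · simp [hpb, hpJ, show p < J + 1 by omega]
        · have hnp : ¬ p < J + 1 := by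
            by_cases h : p = J
            · subst h; rw [hpb] at hjb; cases hjb
            · omega
          simp [hpJ, hnp]
      · simp [hpb]
    · simp only [if_true]
      have hprevlen : ((List.range J).foldl (pvStep (2 ^ i)) c).length = c.length :=
        pvPass_len _ _ _
      have hJc : J < c.length := by omega
      have prevJ : ((List.range J).foldl (pvStep (2 ^ i)) c).getD J 0 = c.getD J 0 := by
        rw [ih J]; simp
      have prevJx : ((List.range J).foldl (pvStep (2 ^ i)) c).getD (J ^^^ 2 ^ i) 0
          = c.getD (J ^^^ 2 ^ i) 0 := by
        rw [ih (J ^^^ 2 ^ i), pv_xor_sub J i hjb]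
        simp [pv_sub_bit J i hjb]
      rw [prevJ, prevJx]
      by_cases hpJ : p = J
      · subst hpJ
        rw [List.getD_eq_getElem?_getD, List.getElem?_set, if_pos rfl, if_pos (by omega)]
        simp [hjb]
      · rw [List.getD_eq_getElem?_getD, List.getElem?_set, if_neg (Ne.symm hpJ),
          ← List.getD_eq_getElem?_getD, ih p]
        by_cases hpb : p.testBit i = true
        · by_cases hpJ' : p < J
          · simp [hpb, hpJ', show p < J + 1 by omega]
          · simp [hpJ', show ¬ p < J + 1 by omega]
        · simp [hpb]

lemma pvA_len (t : List Int) (m k : Nat) : (pvA t m k).length = t.length := by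
  induction k with
  | zero => rfl
  | succ k ih =>
    rw [pvA, List.range_succ, List.foldl_append, List.foldl_cons, List.foldl_nil]
    rw [show (List.range k).foldl (fun c i => (List.range m).foldl (pvStep (2 ^ i)) c) t
        = pvA t m k from rfl]
    rw [pvPass_len, ih]

lemma pvInv (t : List Int) (n' : Nat) (hlen : 2 ^ n' ≤ t.length) (k : Nat) (p : Nat) :
    (pvA t (2 ^ n') k).getD p 0 = if p < 2 ^ n' then pvG t k p else t.getD p 0 := by
  induction k generalizing p with
  | zero =>
    rw [show pvA t (2 ^ n') 0 = t from rfl]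
    by_cases hp : p < 2 ^ n'
    · rw [if_pos hp, pvG_zero]
    · rw [if_neg hp]
  | succ k ih =>
    rw [pvA, List.range_succ, List.foldl_append, List.foldl_cons, List.foldl_nil]
    rw [show (List.range k).foldl (fun c i => (List.range (2 ^ n')).foldl (pvStep (2 ^ i)) c) t
        = pvA t (2 ^ n') k from rfl]
    rw [pvPass_getD k _ _ (by rw [pvA_len]; exact hlen) p]
    by_cases hp : p < 2 ^ n'
    · rw [if_pos hp, pvG_succ]
      cases hpb : p.testBit k
      · simp only [Bool.false_eq_true, and_false, if_false]
        rw [ih p, if_pos hp]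
      · rw [if_pos (And.intro hp rfl), ih p, if_pos hp, pv_xor_sub p k hpb, ih (p - 2 ^ k),
          if_pos (Nat.lt_of_le_of_lt (Nat.sub_le p (2 ^ k)) hp), if_pos rfl]
    · rw [if_neg (by simp [hp]), ih p, if_neg hp, if_neg hp]

-- ---- B's value agrees with the fully transformed table ----
lemma pvG_top (t : List Int) (n' p : Nat) (hp : p < 2 ^ n') : pvG t n' p = pvAnfAt t p := by
  rw [pvG, Nat.mod_eq_of_lt hp, Nat.sub_self, pvFX,
    show 2 ^ n' = (p + 1) + (2 ^ n' - (p + 1)) by omega, List.range_add, List.foldl_append,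
    List.foldl_map]
  have hfirst :
      List.foldl (fun a v => if v &&& p == v then PySem.Int.bxor a (t.getD (0 + v) 0) else a) 0
        (List.range (p + 1)) = pvAnfAt t p := by
    rw [pvAnfAt]
    apply List.foldl_ext
    intro a v _
    rw [Nat.zero_add]
  rw [hfirst]
  have hsecond :
      List.foldl (fun a w =>
          if (p + 1 + w) &&& p == p + 1 + w then
            PySem.Int.bxor a (t.getD (0 + (p + 1 + w)) 0)
          else a) (pvAnfAt t p) (List.range (2 ^ n' - (p + 1)))
        = List.foldl (fun a (_ : Nat) => a) (pvAnfAt t p) (List.range (2 ^ n' - (p + 1))) := by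
    apply List.foldl_ext
    intro a w _
    have hne : (p + 1 + w) &&& p ≠ p + 1 + w := by
      have : (p + 1 + w) &&& p ≤ p := Nat.and_le_right
      omega
    simp [hne]
  rw [hsecond, List.foldl_fixed]

-- ---- B's fold of point-writes, characterised per position ----
lemma pvB_len (t : List Int) (f : Nat → Int) (J : Nat) :
    ((List.range J).foldl (fun c u => c.set u (f u)) t).length = t.length := by
  induction J with
  | zero => rfl
  | succ J ih =>
    rw [List.range_succ, List.foldl_append, List.foldl_cons, List.foldl_nil, List.length_set]
    exact ih

lemma pvB_getD (t : List Int) (f : Nat → Int) (J : Nat) (hJ : J ≤ t.length) (p : Nat) :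
    ((List.range J).foldl (fun c u => c.set u (f u)) t).getD p 0
      = if p < J then f p else t.getD p 0 := by
  induction J generalizing p with
  | zero => simp
  | succ J ih =>
    have ih := ih (by omega)
    rw [List.range_succ, List.foldl_append, List.foldl_cons, List.foldl_nil]
    by_cases hpJ : p = J
    · subst hpJ
      have hplen : p < ((List.range p).foldl (fun c u => c.set u (f u)) t).length := by
        rw [pvB_len]; omega
      rw [List.getD_eq_getElem?_getD, List.getElem?_set, if_pos rfl, if_pos hplen,
        if_pos (by omega)]
      rfl
    · rw [List.getD_eq_getElem?_getD, List.getElem?_set, if_neg (Ne.symm hpJ),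
        ← List.getD_eq_getElem?_getD, ih p]
      by_cases hp : p < J
      · rw [if_pos hp, if_pos (by omega)]
      · rw [if_neg hp, if_neg (by omega)]

lemma pv_main (n : Int) (t : List Int) (hpre : Pre_truth_table_to_anf n t) :
    truth_table_to_anf n t = truth_table_to_anf_alt n t := by
  obtain ⟨hn, hne, hlog⟩ := hpre
  have hlen : 2 ^ n.toNat ≤ t.length :=
    (Nat.le_log2 (by simpa using hne)).mp hlog
  have hBdef : truth_table_to_anf_alt n t
      = (List.range (2 ^ n.toNat)).foldl (fun c u => c.set u (pvAnfAt t u)) t := by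
    simp only [truth_table_to_anf_alt, Nat.shiftLeft_eq, one_mul]
  rw [pv_portA, hBdef]
  have hAlen : (pvA t (2 ^ n.toNat) n.toNat).length = t.length := pvA_len t _ _
  have hBlen := pvB_len t (pvAnfAt t) (2 ^ n.toNat)
  apply List.ext_getElem (by rw [hAlen, hBlen])
  intro i h1 h2
  have hit : i < t.length := by rw [hAlen] at h1; exact h1
  rw [← List.getD_eq_getElem _ 0 h1, ← List.getD_eq_getElem _ 0 h2,
    pvInv t n.toNat hlen n.toNat i, pvB_getD t (pvAnfAt t) (2 ^ n.toNat) hlen i]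
  by_cases hi : i < 2 ^ n.toNat
  · rw [if_pos hi, if_pos hi, pvG_top t n.toNat i hi]
  · rw [if_neg hi, if_neg hi]

-- ===== VERDICT (by name: the statement is the Claim_ definition above) =====
theorem truth_table_to_anf_spec : Claim_equal_truth_table_to_anf := by
  intro n truth_table _ hpre
  unfold Spec_truth_table_to_anf
  exact pv_main n truth_table hpre
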